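-- pv_equiv track=rewrite | github.com/HengyuanWU/SOPilot | backend/src/app/domain/kg/idempotent.py | _deduplicate_aliases
-- ===== SOURCE A (Python) =====
-- from typing import Dict, Any, List, Set
--
-- def _deduplicate_aliases(aliases: List[str], canonical_name: str) -> List[str]:
--     """去重别名列表"""
--     if not aliases:
--         return []
--
--     # 创建集合去重，并排除canonical_name
--     unique_aliases = set()
--     for alias in aliases:
--         if alias and alias.strip() and alias.strip() != canonical_name:
--             unique_aliases.add(alias.strip())
--
--     return sorted(list(unique_aliases))
-- ===== SOURCE B (Python) =====
-- def _deduplicate_aliases(aliases, canonical_name):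
--     """Dedup by sort-then-adjacent-scan instead of a hash set."""
--     if not aliases:
--         return []
--     kept = []
--     for alias in aliases:
--         s = alias.strip()
--         if s and s != canonical_name:
--             kept.append(s)
--     kept.sort()
--     out = []
--     for s in kept:
--         if not out or out[-1] != s:
--             out.append(s)
--     return out
-- ===== Notes on version B (the rewrite author's own statement) =====
-- stated objective: alternative
-- what changed: Replaces the hash-set dedup with a sort-then-scan: collect the stripped, filtered aliases into a plain list, sort it, then one adjacent-comparison pass removes duplicates.
import Mathlib
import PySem

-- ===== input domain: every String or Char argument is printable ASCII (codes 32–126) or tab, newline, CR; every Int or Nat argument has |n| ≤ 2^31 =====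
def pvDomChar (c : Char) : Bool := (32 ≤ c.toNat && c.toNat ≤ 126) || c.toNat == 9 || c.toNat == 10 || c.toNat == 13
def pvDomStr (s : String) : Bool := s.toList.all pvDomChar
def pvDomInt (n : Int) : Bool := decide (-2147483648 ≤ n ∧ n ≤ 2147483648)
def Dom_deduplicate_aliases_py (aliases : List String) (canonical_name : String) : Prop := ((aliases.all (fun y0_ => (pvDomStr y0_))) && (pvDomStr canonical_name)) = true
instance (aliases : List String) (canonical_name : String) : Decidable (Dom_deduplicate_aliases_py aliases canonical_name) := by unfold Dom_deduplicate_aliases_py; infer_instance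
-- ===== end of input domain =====

-- B replaces the hash-set dedup with a sort-then-adjacent-scan pass (alternative decomposition, same cost).

-- ===== PORT A =====
def deduplicate_aliases_py (aliases : List String) (canonical_name : String) : List String :=
  if aliases = [] then []
  else
    let unique_aliases : PySem.Set String :=
      aliases.foldl (fun s al =>
        if al ≠ "" ∧ PySem.Str.strip al ≠ "" ∧ PySem.Str.strip al ≠ canonical_name then
          PySem.Set.add s (PySem.Str.strip al)
        else s) PySem.Set.empty
    PySem.List.sorted unique_aliases (fun x => x) false

-- ===== PORT B =====
-- the adjacent-comparison dedup step of Source B's second loop: append unless equal to out[-1]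
def pvDedupStep (out : List String) (s : String) : List String :=
  if out = [] ∨ out.getLast? ≠ some s then out ++ [s] else out

def deduplicate_aliases_py_alt (aliases : List String) (canonical_name : String) : List String :=
  if aliases = [] then []
  else
    let kept : List String :=
      aliases.foldl (fun acc al =>
        let s := PySem.Str.strip al
        if s ≠ "" ∧ s ≠ canonical_name then acc ++ [s] else acc) []
    let sortedKept := PySem.List.sorted kept (fun x => x) false
    sortedKept.foldl pvDedupStep []

-- ===== PRECONDITION & SPEC =====
def Spec_deduplicate_aliases_py (aliases : List String) (canonical_name : String) (out : List String) : Prop := out = deduplicate_aliases_py_alt aliases canonical_name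
instance (aliases : List String) (canonical_name : String) (out : List String) : Decidable (Spec_deduplicate_aliases_py aliases canonical_name out) := by unfold Spec_deduplicate_aliases_py; infer_instance

-- ===== CLAIM (what is proved, stated in full; the proofs are below) =====
def Claim_equal_deduplicate_aliases_py : Prop := ∀ (aliases : List String) (canonical_name : String), Dom_deduplicate_aliases_py aliases canonical_name → Spec_deduplicate_aliases_py aliases canonical_name (deduplicate_aliases_py aliases canonical_name)

-- ===== LEMMAS AND PROOFS =====

-- the filtered/stripped multiset both programs collect, as a filterMap
def pvKept (aliases : List String) (canonical_name : String) : List String :=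
  aliases.filterMap (fun a =>
    if PySem.Str.strip a ≠ "" ∧ PySem.Str.strip a ≠ canonical_name then some (PySem.Str.strip a) else none)

theorem strip_ne_empty_imp_ne {a : String} (h : PySem.Str.strip a ≠ "") : a ≠ "" := by
  intro he; subst he; exact h rfl

-- A's set-building loop is Set.update with the kept list
theorem foldA_eq_ofList (cn : String) : ∀ (l : List String) (s : PySem.Set String),
    l.foldl (fun s al =>
      if al ≠ "" ∧ PySem.Str.strip al ≠ "" ∧ PySem.Str.strip al ≠ cn then
        PySem.Set.add s (PySem.Str.strip al) else s) s
    = PySem.Set.update s (pvKept l cn) := by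
  intro l
  induction l with
  | nil => intro s; rfl
  | cons a t ih =>
    intro s
    by_cases h : PySem.Str.strip a ≠ "" ∧ PySem.Str.strip a ≠ cn
    · have hcond : a ≠ "" ∧ PySem.Str.strip a ≠ "" ∧ PySem.Str.strip a ≠ cn :=
        ⟨strip_ne_empty_imp_ne h.1, h⟩
      simp only [List.foldl, pvKept, List.filterMap_cons, if_pos hcond, if_pos h]
      rw [ih]
      rfl
    · have hcond : ¬ (a ≠ "" ∧ PySem.Str.strip a ≠ "" ∧ PySem.Str.strip a ≠ cn) := by
        intro hc; exact h ⟨hc.2.1, hc.2.2⟩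
      simp only [List.foldl, pvKept, List.filterMap_cons, if_neg hcond, if_neg h]
      exact ih s

-- B's append loop collects the same kept list
theorem foldB_eq_kept (cn : String) : ∀ (l : List String) (acc : List String),
    l.foldl (fun acc al =>
      let s := PySem.Str.strip al
      if s ≠ "" ∧ s ≠ cn then acc ++ [s] else acc) acc
    = acc ++ pvKept l cn := by
  intro l
  induction l with
  | nil => intro acc; simp [pvKept]
  | cons a t ih =>
    intro acc
    by_cases h : PySem.Str.strip a ≠ "" ∧ PySem.Str.strip a ≠ cn
    · have hk : pvKept (a :: t) cn = PySem.Str.strip a :: pvKept t cn := by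
        simp [pvKept, h]
      rw [List.foldl_cons, ih, hk]
      simp [h]
    · have hk : pvKept (a :: t) cn = pvKept t cn := by
        simp only [pvKept, List.filterMap_cons, if_neg h]
      rw [List.foldl_cons, ih, hk]
      simp [h]

-- membership through the adjacent-dedup scan
theorem mem_foldl_dedup : ∀ (ys acc : List String) (x : String),
    x ∈ ys.foldl pvDedupStep acc ↔ x ∈ acc ∨ x ∈ ys := by
  intro ys
  induction ys with
  | nil => intro acc x; simp
  | cons s t ih =>
    intro acc x
    rw [List.foldl_cons, ih]
    by_cases h : acc = [] ∨ acc.getLast? ≠ some s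
    · simp only [pvDedupStep, if_pos h, List.mem_append, List.mem_cons]
      tauto
    · have hs : s ∈ acc := by
        rcases not_or.mp h with ⟨_, h2⟩
        exact List.mem_of_getLast? (not_not.mp h2)
      simp only [pvDedupStep, if_neg h, List.mem_cons]
      constructor
      · tauto
      · rintro (h1 | h1 | h1)
        · exact Or.inl h1
        · exact Or.inl (h1 ▸ hs)
        · exact Or.inr h1

-- in a strictly increasing list every element is ≤ the last
theorem le_getLast_of_pairwise_lt : ∀ (l : List String), l.Pairwise (· < ·) →
    ∀ a ∈ l, ∀ z, l.getLast? = some z → a ≤ z := by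
  intro l
  induction l with
  | nil => intro _ a ha; simp at ha
  | cons x t ih =>
    intro hp a ha z hz
    rcases List.pairwise_cons.mp hp with ⟨hx, ht⟩
    cases t with
    | nil =>
      simp at ha hz; subst ha; subst hz; exact le_refl _
    | cons y u =>
      have hz' : (y :: u).getLast? = some z := by simpa using hz
      rcases List.mem_cons.mp ha with h1 | h1
      · subst h1
        exact le_of_lt (hx z (List.mem_of_getLast? hz'))
      · exact ih ht a h1 z hz'

-- the adjacent-dedup scan of a sorted list is strictly increasing
theorem pairwise_foldl_dedup : ∀ (ys acc : List String),
    acc.Pairwise (· < ·) → ys.Pairwise (· ≤ ·) →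
    (∀ z, acc.getLast? = some z → ∀ y ∈ ys, z ≤ y) →
    (ys.foldl pvDedupStep acc).Pairwise (· < ·) := by
  intro ys
  induction ys with
  | nil => intro acc h _ _; simpa using h
  | cons s t ih =>
    intro acc hacc hys hlast
    rcases List.pairwise_cons.mp hys with ⟨hs, ht⟩
    rw [List.foldl_cons]
    by_cases h : acc = [] ∨ acc.getLast? ≠ some s
    · have hstep : pvDedupStep acc s = acc ++ [s] := by unfold pvDedupStep; rw [if_pos h]
      rw [hstep]
      apply ih
      · rw [List.pairwise_append]
        refine ⟨hacc, by simp, ?_⟩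
        intro a ha b hb
        simp only [List.mem_singleton] at hb; subst hb
        have hzex : ∃ z, acc.getLast? = some z := by
          cases hacc' : acc.getLast? with
          | none => exact absurd (List.getLast?_eq_none_iff.mp hacc') (by rintro rfl; simp at ha)
          | some z => exact ⟨z, rfl⟩
        obtain ⟨z, hz⟩ := hzex
        have haz : a ≤ z := le_getLast_of_pairwise_lt acc hacc a ha z hz
        have hzs : z ≤ b := hlast z hz b (by simp)
        have hzs' : z ≠ b := by
          rcases h with h | h
          · rw [h] at hz; simp at hz
          · intro he; exact h (he ▸ hz)
        exact lt_of_le_of_lt haz (lt_of_le_of_ne hzs hzs')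
      · exact ht
      · intro z hz y hy
        rw [List.getLast?_concat] at hz
        cases hz
        exact hs y hy
    · have hstep : pvDedupStep acc s = acc := by unfold pvDedupStep; rw [if_neg h]
      rw [hstep]
      rcases not_or.mp h with ⟨_, hlast'⟩
      have hlast2 : acc.getLast? = some s := not_not.mp hlast'
      apply ih acc hacc ht
      intro z hz y hy
      rw [hlast2] at hz; cases hz; exact hs y hy

theorem main_eq (aliases : List String) (cn : String) :
    deduplicate_aliases_py aliases cn = deduplicate_aliases_py_alt aliases cn := by
  by_cases he : aliases = []
  · simp [deduplicate_aliases_py, deduplicate_aliases_py_alt, he]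
  · simp only [deduplicate_aliases_py, deduplicate_aliases_py_alt, if_neg he]
    rw [foldA_eq_ofList cn aliases PySem.Set.empty, foldB_eq_kept cn aliases []]
    simp only [List.nil_append]
    have hupd : PySem.Set.update PySem.Set.empty (pvKept aliases cn)
        = PySem.Set.ofList (pvKept aliases cn) := by
      rw [PySem.Set.ofList_eq_foldl]; rfl
    rw [hupd]
    set K := pvKept aliases cn with hK
    set S := PySem.List.sorted K (fun x => x) false with hS
    set ys := S.foldl pvDedupStep [] with hys
    have hpair : ys.Pairwise (· < ·) := by
      apply pairwise_foldl_dedup S [] (by simp)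
      · have := PySem.List.sorted_pairwise (xs := K) (key := fun x => x) (κ := String)
        simpa using this
      · intro z hz; simp at hz
    have hperm : ys.Perm (PySem.Set.ofList K) := by
      rw [List.perm_ext_iff_of_nodup (hpair.imp (fun h => ne_of_lt h)) (PySem.Set.nodup_ofList K)]
      intro a
      rw [hys, mem_foldl_dedup]
      simp only [List.not_mem_nil, false_or]
      rw [hS, PySem.List.mem_sorted, PySem.Set.mem_ofList]
    exact PySem.List.sorted_eq_of_perm_of_pairwise_lt (PySem.Set.ofList K) ys (fun x => x) hperm (by simpa using hpair)

-- ===== VERDICT (by name: the statement is the Claim_ definition above) =====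
theorem deduplicate_aliases_py_spec : Claim_equal_deduplicate_aliases_py := by
  intro aliases cn _
  unfold Spec_deduplicate_aliases_py
  exact main_eq aliases cn
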